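-- pv_equiv track=rewrite | github.com/leethacker/Jazzy | jazzy.py | genids
-- ===== SOURCE A (Python) =====
-- def genids(max):
--
--     from string import ascii_lowercase
--     import itertools
--
--     def iter_all_strings():
--         for size in itertools.count(1):
--             for s in itertools.product(ascii_lowercase, repeat=size):
--                 yield "".join(s)
--
--     result = []
--     i = 0
--     for s in iter_all_strings():
--         result.append(s)
--         i += 1
--         if i >= max : break
--     return result
-- ===== SOURCE B (Python) =====
-- def genids(max):
--     def to_id(n):
--         s = ""
--         while n > 0:
--             n -= 1
--             s = chr(97 + n % 26) + s
--             n //= 26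
--         return s
--     result = []
--     n = 1
--     while True:
--         result.append(to_id(n))
--         if n >= max:
--             break
--         n += 1
--     return result
-- ===== Notes on version B (the rewrite author's own statement) =====
-- stated objective: alternative
-- what changed: A enumerates all lowercase strings by increasing length via an itertools.product generator; B computes each identifier directly from its 1-based index by bijective base-26 conversion, keeping the append-then-check loop so max<=1 still yields ['a'].
import Mathlib
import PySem

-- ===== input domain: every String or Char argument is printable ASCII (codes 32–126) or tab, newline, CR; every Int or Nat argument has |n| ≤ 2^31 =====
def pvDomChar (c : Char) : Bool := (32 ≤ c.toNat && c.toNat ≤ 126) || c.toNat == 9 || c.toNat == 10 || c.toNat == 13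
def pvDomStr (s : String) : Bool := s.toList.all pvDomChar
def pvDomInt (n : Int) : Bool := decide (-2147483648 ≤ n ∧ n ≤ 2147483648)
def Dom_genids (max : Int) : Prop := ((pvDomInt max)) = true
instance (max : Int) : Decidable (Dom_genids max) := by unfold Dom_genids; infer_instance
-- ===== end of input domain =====

-- B replaces A's itertools.product stream enumeration with a direct bijective base-26 index-to-string conversion (objective: alternative).


-- ===== PORT A =====
def lowersA : List Char := "abcdefghijklmnopqrstuvwxyz".toList

-- itertools.product(ascii_lowercase, repeat=size), joined: leftmost letter varies slowest
def prodChars : Nat → List (List Char)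
  | 0 => [[]]
  | n+1 => lowersA.flatMap (fun c => (prodChars n).map (fun s => c :: s))

def prodStrings (n : Nat) : List String := (prodChars n).map String.mk

theorem prodChars_ne_nil (n : Nat) : prodChars n ≠ [] := by
  cases n with
  | zero => simp [prodChars]
  | succ m =>
    simp only [prodChars, lowersA]
    intro h
    rw [List.flatMap_eq_nil_iff] at h
    have := h 'a' (by decide)
    simp [List.map_eq_nil_iff] at this
    exact prodChars_ne_nil m this

-- the for-loop over the infinite generator: fuel = number of appends it performs
-- (the loop appends first and only then checks i >= max, hence fuel = max(1, max))
def genidsLoopA (fuel : Nat) (pending : List String) (size : Nat) (acc : List String) :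
    List String :=
  match fuel, pending with
  | 0, _ => acc.reverse
  | f+1, [] => genidsLoopA (f+1) (prodStrings (size+1)) (size+1) acc
  | f+1, s :: rest => genidsLoopA f rest size (s :: acc)
termination_by fuel * 2 + (1 - pending.length)
decreasing_by
  · have h : (prodChars (size+1)).length ≠ 0 := by
      simpa [List.length_eq_zero_iff] using prodChars_ne_nil (size+1)
    simp only [prodStrings, List.length_map, List.length_nil]
    omega
  · simp only [List.length_cons]; omega

def genids (max : Int) : List String :=
  genidsLoopA (if max ≤ 1 then 1 else max.toNat) (prodStrings 1) 1 []

-- ===== PORT B =====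
-- bijective base-26: while n > 0: n -= 1; s = chr(97 + n % 26) + s; n //= 26
def toIdAux : Nat → List Char → List Char
  | 0, acc => acc
  | n+1, acc => toIdAux (n / 26) (Char.ofNat (97 + n % 26) :: acc)
decreasing_by exact Nat.lt_succ_of_le (Nat.div_le_self n 26)

def toId (n : Nat) : String := String.mk (toIdAux n [])

def genidsAltLoop (max : Int) (n : Nat) : List String :=
  toId n :: (if (n : Int) ≥ max then [] else genidsAltLoop max (n+1))
termination_by (max - n).toNat
decreasing_by omega

def genids_alt (max : Int) : List String := genidsAltLoop max 1

-- ===== PRECONDITION & SPEC =====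
def Spec_genids (max : Int) (out : List String) : Prop := out = genids_alt max
instance (max : Int) (out : List String) : Decidable (Spec_genids max out) := by unfold Spec_genids; infer_instance

-- ===== CLAIM (what is proved, stated in full; the proofs are below) =====
def Claim_equal_genids : Prop := ∀ (max : Int), Dom_genids max → Spec_genids max (genids max)

-- ===== LEMMAS AND PROOFS =====

-- 1-based start index of the block of identifiers of length L: blockStart 1 = 1, blockStart 2 = 27, …
def blockStart : Nat → Nat
  | 0 => 0
  | L+1 => blockStart L + 26^L

-- fixed-length base-26 digit list of j (< 26^L), most significant first
def repChars : Nat → Nat → List Char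
  | 0, _ => []
  | L+1, j => repChars L (j / 26) ++ [Char.ofNat (97 + j % 26)]

theorem flatMap_congr' {α β : Type} (l : List α) (f g : α → List β)
    (h : ∀ a ∈ l, f a = g a) : l.flatMap f = l.flatMap g := by
  induction l with
  | nil => rfl
  | cons x xs ih =>
    simp only [List.flatMap_cons]
    rw [h x (by simp), ih (fun a ha => h a (by simp [ha]))]

theorem blockStart_pos (L : Nat) : 1 ≤ blockStart (L+1) := by
  have : 0 < (26:Nat)^L := by positivity
  simp only [blockStart]; omega

theorem blockStart_succ_sub_one (L : Nat) : blockStart (L+1) - 1 = 26 * blockStart L := by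
  induction L with
  | zero => simp [blockStart]
  | succ m ih =>
    have h1 := blockStart_pos m
    simp only [blockStart] at *
    have : 26 ^ (m+1) = 26 * 26 ^ m := by ring
    omega

theorem toIdAux_block (L : Nat) : ∀ j acc, j < 26^L →
    toIdAux (blockStart L + j) acc = repChars L j ++ acc := by
  induction L with
  | zero => intro j acc hj; interval_cases j <;> simp [blockStart, toIdAux, repChars]
  | succ m ih =>
    intro j acc hj
    have h1 := blockStart_pos m
    have hn : blockStart (m+1) + j = (blockStart (m+1) + j - 1) + 1 := by omega
    rw [hn, toIdAux]
    have hsub : blockStart (m+1) + j - 1 = 26 * blockStart m + j := by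
      have := blockStart_succ_sub_one m; omega
    rw [hsub]
    have hmod : (26 * blockStart m + j) % 26 = j % 26 := by omega
    have hdiv : (26 * blockStart m + j) / 26 = blockStart m + j / 26 := by omega
    rw [hmod, hdiv, ih (j / 26) _ (by
      have : 26 ^ (m+1) = 26 * 26 ^ m := by ring
      omega)]
    simp [repChars]

theorem repChars_peel (L : Nat) : ∀ q r, q < 26 → r < 26^L →
    repChars (L+1) (q * 26^L + r) = Char.ofNat (97 + q) :: repChars L r := by
  induction L with
  | zero =>
    intro q r hq hr
    interval_cases r
    simp [repChars, Nat.mod_eq_of_lt hq]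
  | succ m ih =>
    intro q r hq hr
    have hmod : (q * 26^(m+1) + r) % 26 = r % 26 := by
      have : q * 26^(m+1) = 26 * (q * 26^m) := by ring
      omega
    have hdiv : (q * 26^(m+1) + r) / 26 = q * 26^m + r / 26 := by
      have : q * 26^(m+1) = 26 * (q * 26^m) := by ring
      omega
    have hr26 : r / 26 < 26^m := by
      have : 26 ^ (m+1) = 26 * 26 ^ m := by ring
      omega
    show repChars (m+1) ((q * 26^(m+1) + r) / 26) ++ [Char.ofNat (97 + (q * 26^(m+1) + r) % 26)]
        = Char.ofNat (97 + q) :: repChars (m+1) r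
    rw [hmod, hdiv, ih q (r / 26) hq hr26]
    show Char.ofNat (97 + q) :: (repChars m (r / 26) ++ [Char.ofNat (97 + r % 26)])
        = Char.ofNat (97 + q) :: repChars (m+1) r
    rfl

theorem toId_block (L j : Nat) (hj : j < 26^L) :
    toId (blockStart L + j) = String.mk (repChars L j) := by
  simp [toId, toIdAux_block L j [] hj]

theorem lowersA_eq : lowersA = (List.range 26).map (fun q => Char.ofNat (97 + q)) := by decide

theorem range'_mul (k : Nat) : ∀ s m, List.range' s (k * m) =
    (List.range k).flatMap (fun q => List.range' (s + q * m) m) := by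
  induction k with
  | zero => simp
  | succ t ih =>
    intro s m
    have h : (t+1) * m = t * m + m := by ring
    have happ := List.range'_append (s := s) (m := t * m) (n := m) (step := 1)
    simp only [one_mul] at happ
    rw [h, ← happ, ih, List.range_succ]
    simp

theorem prodChars_eq (L : Nat) : prodChars L = (List.range (26^L)).map (repChars L) := by
  induction L with
  | zero => simp [prodChars, repChars]
  | succ m ih =>
    have hpow : (26:Nat)^(m+1) = 26 * 26^m := by ring
    rw [show prodChars (m+1) = lowersA.flatMap (fun c => (prodChars m).map (fun s => c :: s)) from rfl,
        lowersA_eq, ih, hpow]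
    rw [show List.range (26 * 26^m) = List.range' 0 (26 * 26^m) from List.range_eq_range',
        range'_mul 26 0 (26^m), List.flatMap_map, List.map_flatMap]
    apply flatMap_congr'
    intro q hq
    simp only [List.mem_range] at hq
    simp only [zero_add, List.range'_eq_map_range, List.map_map]
    apply List.map_congr_left
    intro r hr
    simp only [List.mem_range] at hr
    simp only [Function.comp]
    exact (repChars_peel m q r hq hr).symm

theorem prodStrings_eq (L : Nat) :
    prodStrings L = (List.range' (blockStart L) (26^L)).map toId := by
  rw [prodStrings, prodChars_eq, List.range'_eq_map_range]
  simp only [List.map_map]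
  apply List.map_congr_left
  intro j hj
  simp only [List.mem_range] at hj
  simp only [Function.comp]
  exact (toId_block L j hj).symm

theorem genidsLoop_eq :
    ∀ (fuel : Nat) (pending : List String) (size : Nat) (acc : List String),
    ∀ t : Nat, t ≤ blockStart (size+1) →
    pending = (List.range' t (blockStart (size+1) - t)).map toId →
    genidsLoopA fuel pending size acc = acc.reverse ++ (List.range' t fuel).map toId := by
  intro fuel pending size acc
  induction fuel, pending, size, acc using genidsLoopA.induct with
  | case1 pending size acc =>
    intro t _ _
    rw [genidsLoopA.eq_def]
    simp
  | case2 size acc f ih =>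
    intro t htle ht
    have hd0 : blockStart (size+1) - t = 0 := by
      have := congrArg List.length ht
      simpa using this.symm
    have hteq : t = blockStart (size+1) := by omega
    have hstep : genidsLoopA (f+1) [] size acc
        = genidsLoopA (f+1) (prodStrings (size+1)) (size+1) acc := by
      rw [genidsLoopA.eq_def]
    rw [hstep]
    subst hteq
    have hpw : (26:Nat)^(size+1) = 26 * 26^size := by ring
    have hp : 0 < (26:Nat)^size := by positivity
    apply ih (blockStart (size+1))
    · simp only [blockStart] at *; omega
    · rw [prodStrings_eq]
      have hcnt : blockStart (size+1+1) - blockStart (size+1) = 26^(size+1) := by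
        simp only [blockStart]; omega
      rw [hcnt]
  | case3 size acc f s rest ih =>
    intro t htle ht
    have hne : blockStart (size+1) - t ≠ 0 := by
      intro h0; rw [h0] at ht; simp at ht
    obtain ⟨d, hd⟩ : ∃ d, blockStart (size+1) - t = d + 1 :=
      ⟨blockStart (size+1) - t - 1, by omega⟩
    rw [hd, List.range'_succ, List.map_cons] at ht
    injection ht with hs hrest
    have hstep : genidsLoopA (f+1) (s :: rest) size acc
        = genidsLoopA f rest size (s :: acc) := by
      rw [genidsLoopA.eq_def]
    rw [hstep, ih (t+1) (by omega) (by rw [hrest]; congr 2; omega)]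
    simp [hs, List.range'_succ]

theorem genidsAlt_eq (max : Int) : ∀ n : Nat,
    genidsAltLoop max n =
      (List.range' n (if max ≤ (n:Int) then 1 else (max - n + 1).toNat)).map toId := by
  intro n
  induction hk : (max - n).toNat generalizing n with
  | zero =>
    have hle : max ≤ (n:Int) := by omega
    rw [genidsAltLoop.eq_def, if_pos (by omega : (n:Int) ≥ max), if_pos hle]
    simp [List.range'_one]
  | succ k ih =>
    have hgt : ¬ max ≤ (n:Int) := by omega
    rw [genidsAltLoop.eq_def, if_neg (by omega : ¬ (n:Int) ≥ max),
        ih (n+1) (by push_cast; omega)]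
    have hc : (if max ≤ ((n+1:Nat):Int) then 1 else (max - ((n+1:Nat):Int) + 1).toNat) = k + 1 := by
      split_ifs with h <;> push_cast at * <;> omega
    rw [hc, if_neg hgt]
    have hcount : (max - n + 1).toNat = (k + 1) + 1 := by omega
    rw [hcount]
    simp [List.range'_succ]

theorem genids_eq (max : Int) :
    genids max = (List.range' 1 (if max ≤ 1 then 1 else max.toNat)).map toId := by
  rw [genids]
  apply genidsLoop_eq _ _ _ _ 1
  · decide
  · rw [prodStrings_eq]
    norm_num [blockStart]

-- ===== VERDICT (by name: the statement is the Claim_ definition above) =====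
theorem genids_spec : Claim_equal_genids := by
  intro max _
  unfold Spec_genids
  rw [genids_eq, genids_alt, genidsAlt_eq max 1]
  have h1 : ((1:Nat):Int) = 1 := by norm_num
  rw [h1, show max - 1 + 1 = max from by ring]
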